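-- pv_equiv track=rewrite | github.com/MohammadHamidi/FarsiAI_text | app/utils/text_processor.py | _process_definition_lists
-- ===== SOURCE A (Python) =====
-- def _process_definition_lists(text: str) -> str:
--     """Process definition list syntax."""
--     # Convert term: definition format to proper markdown
--     lines = text.split('\n')
--     enhanced_lines = []
--
--     for line in lines:
--         # Look for term: definition pattern
--         if ':' in line and not line.startswith(' ') and not line.startswith('\t'):
--             parts = line.split(':', 1)
--             if len(parts) == 2:
--                 term, definition = parts
--                 enhanced_lines.append(f"**{term.strip()}**")
--                 enhanced_lines.append(f": {definition.strip()}")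
--             else:
--                 enhanced_lines.append(line)
--         else:
--             enhanced_lines.append(line)
--
--     return '\n'.join(enhanced_lines)
-- ===== SOURCE B (Python) =====
-- def _render_def_line(line: str) -> str:
--     if line[:1] in (' ', '\t'):
--         return line
--     term, colon, definition = line.partition(':')
--     if not colon:
--         return line
--     return '**' + term.strip() + '**\n: ' + definition.strip()
--
--
-- def _process_definition_lists(text: str) -> str:
--     """Process definition list syntax."""
--     out = []
--     rest = text
--     while True:
--         line, sep, nxt = rest.partition('\n')
--         out.append(_render_def_line(line))
--         if not sep:
--             return '\n'.join(out)
--         rest = nxt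
-- ===== Notes on version B (the rewrite author's own statement) =====
-- stated objective: alternative
-- what changed: B replaces A's split-all-lines / membership-test / flag-guarded double-append / join pipeline by a stream consumption of the text with str.partition and a per-line renderer that returns one replacement string per line.
import Mathlib
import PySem

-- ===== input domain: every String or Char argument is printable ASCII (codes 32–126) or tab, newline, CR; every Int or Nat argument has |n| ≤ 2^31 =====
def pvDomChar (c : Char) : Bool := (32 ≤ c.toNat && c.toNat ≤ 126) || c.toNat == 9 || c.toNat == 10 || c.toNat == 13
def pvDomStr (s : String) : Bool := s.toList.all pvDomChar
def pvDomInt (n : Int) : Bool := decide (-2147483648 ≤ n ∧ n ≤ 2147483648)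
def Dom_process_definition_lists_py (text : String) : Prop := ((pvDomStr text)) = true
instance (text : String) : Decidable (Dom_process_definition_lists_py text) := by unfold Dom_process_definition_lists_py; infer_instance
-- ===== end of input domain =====

-- B replaces A's split-all / flag-guarded double-append / join pipeline by a stream consumption of the
-- text with partition plus a per-line renderer returning one replacement string (objective: alternative).

-- ===== PORT A =====
-- literal transliteration of A: split on '\n', loop appending one or two pieces, join with '\n'
def process_definition_lists_py (text : String) : String :=
  let lines := PySem.Chars.splitOn text.toList ['\n']          -- text.split('\n')
  let enhanced := lines.foldl (fun acc line =>
    if PySem.Chars.isIn [':'] line && !(PySem.Chars.startswith line [' ']) && !(PySem.Chars.startswith line ['\t']) then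
      match PySem.Chars.splitOnMax line [':'] 1 with           -- line.split(':', 1)  (sep ≠ '')
      | [term, definition] =>                                  -- len(parts) == 2, term, definition = parts
          acc ++ [('*' :: '*' :: PySem.Chars.strip term) ++ ['*', '*'],
                  ':' :: ' ' :: PySem.Chars.strip definition]
      | _ => acc ++ [line]
    else acc ++ [line]) ([] : List (List Char))
  String.ofList (PySem.Chars.join ['\n'] enhanced)             -- '\n'.join(enhanced_lines)

-- ===== PORT B =====
-- _render_def_line: line[:1] is List.take 1 (exact); line.partition(':') for the single-char sep is
-- (takeWhile (≠':'), found?, drop past the first ':') — exact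
def pvRender (line : List Char) : List Char :=
  if line.take 1 = [' '] ∨ line.take 1 = ['\t'] then line      -- line[:1] in (' ', '\t')
  else
    let term := line.takeWhile (fun c => c ≠ ':')
    if term.length = line.length then line                     -- 'not colon': no ':' in line
    else ('*' :: '*' :: PySem.Chars.strip term) ++
           '*' :: '*' :: '\n' :: ':' :: ' ' :: PySem.Chars.strip (line.drop (term.length + 1))

-- the while-True loop: rest.partition('\n'), render the line, stop when no separator was found
def pvGoB (cs : List Char) : List (List Char) :=
  let line := cs.takeWhile (fun c => c ≠ '\n')
  if line.length = cs.length then [pvRender cs]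
  else pvRender line :: pvGoB (cs.drop (line.length + 1))
  termination_by cs.length
  decreasing_by
    have h1 := (List.takeWhile_prefix (p := fun c => decide (c ≠ '\n')) (l := cs)).length_le
    have h2 : line.length = (List.takeWhile (fun c => decide (c ≠ '\n')) cs).length := rfl
    simp only [List.length_drop]
    omega

def process_definition_lists_py_alt (text : String) : String :=
  String.ofList (PySem.Chars.join ['\n'] (pvGoB text.toList)) -- '\n'.join(out)

-- ===== PRECONDITION & SPEC =====
def Spec_process_definition_lists_py (text : String) (out : String) : Prop := out = process_definition_lists_py_alt text
instance (text : String) (out : String) : Decidable (Spec_process_definition_lists_py text out) := by unfold Spec_process_definition_lists_py; infer_instance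

-- ===== CLAIM (what is proved, stated in full; the proofs are below) =====
def Claim_equal_process_definition_lists_py : Prop := ∀ (text : String), Dom_process_definition_lists_py text → Spec_process_definition_lists_py text (process_definition_lists_py text)

-- ===== LEMMAS AND PROOFS =====

-- the list of lines of cs (split at '\n'), stated as the same recursion shape as pvGoB
def pvLinesOf (cs : List Char) : List (List Char) :=
  let line := cs.takeWhile (fun c => c ≠ '\n')
  if line.length = cs.length then [cs]
  else line :: pvLinesOf (cs.drop (line.length + 1))
  termination_by cs.length
  decreasing_by
    have h1 := (List.takeWhile_prefix (p := fun c => decide (c ≠ '\n')) (l := cs)).length_le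
    have h2 : line.length = (List.takeWhile (fun c => decide (c ≠ '\n')) cs).length := rfl
    simp only [List.length_drop]
    omega

-- prepend to the head line (the accumulated current chunk of splitOn.go)
def pvModHead (p : List Char) : List (List Char) → List (List Char)
  | [] => []
  | x :: xs => (p ++ x) :: xs

-- the one-or-two pieces A appends for a given line
def pvPieces (line : List Char) : List (List Char) :=
  if PySem.Chars.isIn [':'] line && !(PySem.Chars.startswith line [' ']) && !(PySem.Chars.startswith line ['\t']) then
    match PySem.Chars.splitOnMax line [':'] 1 with
    | [term, definition] =>
        [('*' :: '*' :: PySem.Chars.strip term) ++ ['*', '*'],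
         ':' :: ' ' :: PySem.Chars.strip definition]
    | _ => [line]
  else [line]

theorem pvLinesOf_eq_cons (l : List Char) :
    ∃ t, pvLinesOf l = l.takeWhile (fun c => c ≠ '\n') :: t := by
  rw [pvLinesOf]
  split
  · next h =>
    exact ⟨[], by rw [(List.takeWhile_prefix (l := l) (p := fun c => decide (c ≠ '\n'))).eq_of_length h]⟩
  · exact ⟨_, rfl⟩

theorem pvLinesOf_nil : pvLinesOf [] = [[]] := by
  rw [pvLinesOf]; simp

theorem pvLinesOf_cons_step (c : Char) (rest : List Char) (hc : c ≠ '\n') :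
    pvLinesOf (c :: rest) =
      (if (rest.takeWhile (fun c => c ≠ '\n')).length = rest.length then [c :: rest]
       else (c :: rest.takeWhile (fun c => c ≠ '\n')) :: pvLinesOf (rest.drop ((rest.takeWhile (fun c => c ≠ '\n')).length + 1))) := by
  rw [pvLinesOf]
  simp only [List.takeWhile_cons, hc, decide_not, List.length_cons, List.drop_succ_cons]
  simp

theorem pvLinesOf_step (rest : List Char) :
    pvLinesOf rest =
      (if (rest.takeWhile (fun c => c ≠ '\n')).length = rest.length then [rest]
       else rest.takeWhile (fun c => c ≠ '\n') :: pvLinesOf (rest.drop ((rest.takeWhile (fun c => c ≠ '\n')).length + 1))) := by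
  rw [pvLinesOf]

theorem pvModHead_linesOf_cons (c : Char) (rest : List Char) (p : List Char) (hc : c ≠ '\n') :
    pvModHead p (pvLinesOf (c :: rest)) = pvModHead (p ++ [c]) (pvLinesOf rest) := by
  rw [pvLinesOf_cons_step c rest hc, pvLinesOf_step rest]
  split <;> simp [pvModHead]

theorem pvGo_nl (fuel : Nat) : ∀ (l cur : List Char) (acc : List (List Char)), l.length ≤ fuel →
    PySem.Chars.splitOn.go ['\n'] fuel l cur acc = acc.reverse ++ pvModHead cur.reverse (pvLinesOf l) := by
  induction fuel with
  | zero =>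
    intro l cur acc h
    have hl : l = [] := by simpa using h
    subst hl
    simp [PySem.Chars.splitOn.go, pvLinesOf_nil, pvModHead]
  | succ fuel ih =>
    intro l cur acc h
    cases l with
    | nil => simp [PySem.Chars.splitOn.go, pvLinesOf_nil, pvModHead]
    | cons c rest =>
      by_cases hc : c = '\n'
      · subst hc
        have hstep : PySem.Chars.splitOn.go ['\n'] (fuel+1) ('\n' :: rest) cur acc
            = PySem.Chars.splitOn.go ['\n'] fuel rest [] (cur.reverse :: acc) := by
          simp [PySem.Chars.splitOn.go, List.isPrefixOf]
        rw [hstep, ih rest [] (cur.reverse :: acc) (by simpa using Nat.le_of_succ_le_succ (by simpa using h))]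
        have hlines : pvLinesOf ('\n' :: rest) = [] :: pvLinesOf rest := by
          rw [pvLinesOf]
          simp [List.takeWhile_cons]
        rw [hlines]
        obtain ⟨t, ht⟩ := pvLinesOf_eq_cons rest
        rw [ht]
        simp [pvModHead]
      · have hstep : PySem.Chars.splitOn.go ['\n'] (fuel+1) (c :: rest) cur acc
            = PySem.Chars.splitOn.go ['\n'] fuel rest (c :: cur) acc := by
          simp [PySem.Chars.splitOn.go, List.isPrefixOf, Ne.symm hc]
        rw [hstep, ih rest (c :: cur) acc (by simpa using Nat.le_of_succ_le_succ (by simpa using h))]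
        rw [pvModHead_linesOf_cons c rest cur.reverse hc]
        simp

theorem pvSplitOn_eq_linesOf (cs : List Char) :
    PySem.Chars.splitOn cs ['\n'] = pvLinesOf cs := by
  rw [PySem.Chars.splitOn, pvGo_nl (cs.length + 1) cs [] [] (by omega)]
  obtain ⟨t, ht⟩ := pvLinesOf_eq_cons cs
  rw [ht]
  simp [pvModHead]

theorem pvGoMax_zero (fuel : Nat) (l cur : List Char) (acc : List (List Char)) :
    PySem.Chars.splitOnMax.go [':'] fuel 0 l cur acc = acc.reverse ++ [cur.reverse ++ l] := by
  cases fuel <;> cases l <;> simp [PySem.Chars.splitOnMax.go]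

theorem pvGoMax_one (fuel : Nat) : ∀ (l cur : List Char) (acc : List (List Char)), l.length ≤ fuel →
    PySem.Chars.splitOnMax.go [':'] fuel 1 l cur acc = acc.reverse ++
      (if ':' ∈ l then [cur.reverse ++ l.takeWhile (fun c => c ≠ ':'),
                        l.drop ((l.takeWhile (fun c => c ≠ ':')).length + 1)]
       else [cur.reverse ++ l]) := by
  induction fuel with
  | zero =>
    intro l cur acc h
    have hl : l = [] := by simpa using h
    subst hl
    simp [PySem.Chars.splitOnMax.go]
  | succ fuel ih =>
    intro l cur acc h
    cases l with
    | nil => simp [PySem.Chars.splitOnMax.go]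
    | cons c rest =>
      by_cases hc : c = ':'
      · subst hc
        have hstep : PySem.Chars.splitOnMax.go [':'] (fuel+1) 1 (':' :: rest) cur acc
            = PySem.Chars.splitOnMax.go [':'] fuel 0 rest [] (cur.reverse :: acc) := by
          simp [PySem.Chars.splitOnMax.go, List.isPrefixOf]
        rw [hstep, pvGoMax_zero]
        simp [List.takeWhile_cons]
      · have hstep : PySem.Chars.splitOnMax.go [':'] (fuel+1) 1 (c :: rest) cur acc
            = PySem.Chars.splitOnMax.go [':'] fuel 1 rest (c :: cur) acc := by
          simp [PySem.Chars.splitOnMax.go, List.isPrefixOf, Ne.symm hc]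
        rw [hstep, ih rest (c :: cur) acc (by simpa using Nat.le_of_succ_le_succ (by simpa using h))]
        have hmem : (':' ∈ c :: rest) ↔ (':' ∈ rest) := by simp [Ne.symm hc]
        have htw : (c :: rest).takeWhile (fun c => c ≠ ':') = c :: rest.takeWhile (fun c => c ≠ ':') := by
          simp [List.takeWhile_cons, hc]
        have hd : List.drop ((List.takeWhile (fun c => decide (c ≠ ':')) (c :: rest)).length + 1) (c :: rest)
            = List.drop ((List.takeWhile (fun c => decide (c ≠ ':')) rest).length + 1) rest := by
          rw [htw]; simp [List.drop_succ_cons]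
        by_cases hm : ':' ∈ rest
        · rw [if_pos hm, if_pos (hmem.mpr hm), hd, htw]
          simp
        · rw [if_neg hm, if_neg (fun hx => hm (hmem.mp hx))]
          simp

theorem pvSplitOnMax_colon (l : List Char) :
    PySem.Chars.splitOnMax l [':'] 1 =
      (if ':' ∈ l then [l.takeWhile (fun c => c ≠ ':'),
                        l.drop ((l.takeWhile (fun c => c ≠ ':')).length + 1)]
       else [l]) := by
  rw [PySem.Chars.splitOnMax, if_neg (by omega), show (1 : Int).toNat = 1 from rfl,
    pvGoMax_one (l.length + 1) l [] [] (by omega)]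
  simp

theorem pvIsIn_colon (l : List Char) : PySem.Chars.isIn [':'] l = true ↔ ':' ∈ l := by
  rw [PySem.Chars.isIn_iff_infix]
  constructor
  · intro h; exact (List.singleton_sublist).1 h.sublist
  · intro h; obtain ⟨s, t, rfl⟩ := List.mem_iff_append.1 h; exact ⟨s, t, by simp⟩

theorem pvStartswith_single (l : List Char) (c : Char) :
    PySem.Chars.startswith l [c] = true ↔ l.take 1 = [c] := by
  rw [PySem.Chars.startswith_iff]
  cases l with
  | nil => simp
  | cons a t => simp [List.cons_prefix_cons, eq_comm]

theorem pvColon_len_iff (l : List Char) :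
    (l.takeWhile (fun c => c ≠ ':')).length = l.length ↔ ':' ∉ l := by
  constructor
  · intro h hm
    have he := (List.takeWhile_prefix (l := l) (p := fun c => decide (c ≠ ':'))).eq_of_length h
    have := List.takeWhile_eq_self_iff.1 he _ hm
    simp at this
  · intro h
    rw [List.takeWhile_eq_self_iff.2 (by intro a ha; simp; rintro rfl; exact h ha)]

theorem pvRender_eq_join (line : List Char) :
    pvRender line = PySem.Chars.join ['\n'] (pvPieces line) := by
  unfold pvRender pvPieces
  by_cases h1 : line.take 1 = [' '] ∨ line.take 1 = ['\t']
  · rw [if_pos h1]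
    rcases h1 with h | h
    · have hs : PySem.Chars.startswith line [' '] = true := (pvStartswith_single line ' ').mpr h
      simp [hs, PySem.Chars.join_singleton]
    · have hs : PySem.Chars.startswith line ['\t'] = true := (pvStartswith_single line '\t').mpr h
      simp [hs, PySem.Chars.join_singleton]
  · rw [if_neg h1]
    push_neg at h1
    have hs1 : PySem.Chars.startswith line [' '] = false := by
      rw [Bool.eq_false_iff]; intro hx; exact h1.1 ((pvStartswith_single line ' ').mp hx)
    have hs2 : PySem.Chars.startswith line ['\t'] = false := by
      rw [Bool.eq_false_iff]; intro hx; exact h1.2 ((pvStartswith_single line '\t').mp hx)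
    by_cases h2 : (line.takeWhile (fun c => c ≠ ':')).length = line.length
    · rw [if_pos h2]
      have hni : PySem.Chars.isIn [':'] line = false := by
        rw [Bool.eq_false_iff]; intro hx; exact (pvColon_len_iff line).mp h2 ((pvIsIn_colon line).mp hx)
      simp [hni, PySem.Chars.join_singleton]
    · rw [if_neg h2]
      have hmem : ':' ∈ line := by
        by_contra hx; exact h2 ((pvColon_len_iff line).mpr hx)
      have hii : PySem.Chars.isIn [':'] line = true := (pvIsIn_colon line).mpr hmem
      rw [pvSplitOnMax_colon, if_pos hmem]
      simp only [hii, hs1, hs2, Bool.not_false, Bool.and_true, Bool.true_and, if_true]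
      rw [PySem.Chars.join_cons_cons, PySem.Chars.join_singleton]
      simp

theorem pvPieces_ne_nil (line : List Char) : pvPieces line ≠ [] := by
  unfold pvPieces
  split
  · rcases PySem.Chars.splitOnMax line [':'] 1 with _ | ⟨t, _ | ⟨d, _ | _⟩⟩ <;> simp
  · simp

theorem pvJoin_append (ps qs : List (List Char)) (hp : ps ≠ []) (hq : qs ≠ []) :
    PySem.Chars.join ['\n'] (ps ++ qs) = PySem.Chars.join ['\n'] ps ++ '\n' :: PySem.Chars.join ['\n'] qs := by
  induction ps with
  | nil => exact absurd rfl hp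
  | cons p ps' ih =>
    cases ps' with
    | nil =>
      cases qs with
      | nil => exact absurd rfl hq
      | cons q qs' =>
        rw [List.singleton_append, PySem.Chars.join_cons_cons, PySem.Chars.join_singleton]
        simp
    | cons p' ps'' =>
      have h1 : PySem.Chars.join ['\n'] ((p :: p' :: ps'') ++ qs)
          = p ++ ['\n'] ++ PySem.Chars.join ['\n'] ((p' :: ps'') ++ qs) := by
        rw [show (p :: p' :: ps'') ++ qs = p :: p' :: (ps'' ++ qs) from rfl, PySem.Chars.join_cons_cons]
        rfl
      rw [h1, ih (by simp), PySem.Chars.join_cons_cons]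
      simp

theorem pvFlatMap_ne_nil (lines : List (List Char)) (h : lines ≠ []) :
    lines.flatMap pvPieces ≠ [] := by
  cases lines with
  | nil => exact absurd rfl h
  | cons x xs =>
    simp only [List.flatMap_cons, ne_eq, List.append_eq_nil_iff, not_and]
    intro hx
    exact absurd hx (pvPieces_ne_nil x)

theorem pvJoin_flatMap (lines : List (List Char)) :
    PySem.Chars.join ['\n'] (lines.flatMap pvPieces) = PySem.Chars.join ['\n'] (lines.map pvRender) := by
  induction lines with
  | nil => rfl
  | cons x xs ih =>
    cases xs with
    | nil =>
      simp only [List.flatMap_cons, List.flatMap_nil, List.append_nil, List.map_cons, List.map_nil,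
        PySem.Chars.join_singleton]
      exact (pvRender_eq_join x).symm
    | cons y ys =>
      rw [List.flatMap_cons,
        pvJoin_append _ _ (pvPieces_ne_nil x) (pvFlatMap_ne_nil _ (by simp)),
        ← pvRender_eq_join, ih]
      simp only [List.map_cons]
      rw [PySem.Chars.join_cons_cons]
      simp

theorem pvGoB_eq_map (cs : List Char) : pvGoB cs = (pvLinesOf cs).map pvRender := by
  fun_induction pvGoB cs with
  | case1 cs line h =>
    rw [pvLinesOf, if_pos h]
    simp
  | case2 cs line h ih =>
    rw [pvLinesOf, if_neg h, List.map_cons, ← ih]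

theorem pvFoldA (lines : List (List Char)) (acc : List (List Char)) :
    lines.foldl (fun acc line =>
      if PySem.Chars.isIn [':'] line && !(PySem.Chars.startswith line [' ']) && !(PySem.Chars.startswith line ['\t']) then
        match PySem.Chars.splitOnMax line [':'] 1 with
        | [term, definition] =>
            acc ++ [('*' :: '*' :: PySem.Chars.strip term) ++ ['*', '*'],
                    ':' :: ' ' :: PySem.Chars.strip definition]
        | _ => acc ++ [line]
      else acc ++ [line]) acc = acc ++ lines.flatMap pvPieces := by
  induction lines generalizing acc with
  | nil => simp
  | cons x xs ih =>
    simp only [List.foldl_cons, List.flatMap_cons, ih, ← List.append_assoc]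
    congr 2
    unfold pvPieces
    split
    · rcases PySem.Chars.splitOnMax x [':'] 1 with _ | ⟨t, _ | ⟨d, _ | _⟩⟩ <;> simp
    · simp

-- ===== VERDICT (by name: the statement is the Claim_ definition above) =====
theorem process_definition_lists_py_spec : Claim_equal_process_definition_lists_py := by
  intro text _
  show _ = _
  unfold process_definition_lists_py process_definition_lists_py_alt
  simp only [pvFoldA, List.nil_append, pvSplitOn_eq_linesOf, pvJoin_flatMap, pvGoB_eq_map]
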